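-- pv_equiv track=rewrite | github.com/wekesa/python_practise | algorithms/trouble.py | trouble
-- ===== SOURCE A (Python) =====
-- def trouble(x, t):
--     n = len(x)
--     if not check_existence(x, t):
--         return x
--     for i in range(1, n):
--         if(x[i-1] + x[i] == t):
--             del x[i]
--             break
--     trouble(x, t)
--     return x
--
-- def check_existence(x, t):
--     n = len(x)
--     for i in range(1, n):
--         if(x[i-1] + x[i] == t):
--             return True
--     return False
-- ===== SOURCE B (Python) =====
-- def trouble(x, t):
--     out = []
--     for v in x:
--         if out and out[-1] + v == t:
--             continue
--         out.append(v)
--     x[:] = out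
--     return x
-- ===== Notes on version B (the rewrite author's own statement) =====
-- stated objective: alternative
-- what changed: Replaces the restart-from-scratch delete-and-recurse (rescan the whole list after every deletion) by a single left-to-right stack pass that skips an element when it sums with the last kept element to t.
import Mathlib
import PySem

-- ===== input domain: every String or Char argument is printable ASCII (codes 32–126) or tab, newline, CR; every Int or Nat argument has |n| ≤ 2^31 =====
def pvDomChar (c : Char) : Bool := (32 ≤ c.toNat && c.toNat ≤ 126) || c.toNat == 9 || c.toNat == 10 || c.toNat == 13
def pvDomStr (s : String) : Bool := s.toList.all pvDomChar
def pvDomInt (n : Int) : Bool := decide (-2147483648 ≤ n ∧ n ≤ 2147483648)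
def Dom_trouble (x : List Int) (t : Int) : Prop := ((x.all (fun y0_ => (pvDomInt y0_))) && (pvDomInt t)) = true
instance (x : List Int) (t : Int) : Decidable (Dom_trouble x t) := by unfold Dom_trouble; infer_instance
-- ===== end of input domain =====

-- B replaces A's delete-one-then-rescan recursion by a single left-to-right stack pass.
-- Both Pythons mutate x in place to the same final contents; the theorems are about the return value.

-- ===== PORT A =====
-- `for i in range(1, n): if x[i-1]+x[i]==t: return True` / `return False`
def check_loop (x : List Int) (t : Int) (i : Nat) : Bool :=
  if h : i < x.length then
    if x.getD (i-1) 0 + x.getD i 0 = t then true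
    else check_loop x t (i+1)
  else false
termination_by x.length - i

def check_existence (x : List Int) (t : Int) : Bool := check_loop x t 1

-- `for i in range(1, n): if x[i-1]+x[i]==t: del x[i]; break`
def del_loop (x : List Int) (t : Int) (i : Nat) : List Int :=
  if h : i < x.length then
    if x.getD (i-1) 0 + x.getD i 0 = t then x.take i ++ x.drop (i+1)
    else del_loop x t (i+1)
  else x
termination_by x.length - i

-- the port's termination needs this fact about the loop above (cited in decreasing_by)
lemma del_loop_length (x : List Int) (t : Int) (i : Nat)
    (h : check_loop x t i = true) : (del_loop x t i).length + 1 = x.length := by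
  have key : ∀ k i, x.length - i ≤ k → check_loop x t i = true →
      (del_loop x t i).length + 1 = x.length := by
    intro k
    induction k with
    | zero =>
      intro i hk hc
      unfold check_loop at hc
      rw [dif_neg (by omega)] at hc
      exact absurd hc (by simp)
    | succ k ih =>
      intro i hk hc
      unfold check_loop at hc
      unfold del_loop
      by_cases hlt : i < x.length
      · rw [dif_pos hlt] at hc
        rw [dif_pos hlt]
        by_cases hcond : x.getD (i-1) 0 + x.getD i 0 = t
        · rw [if_pos hcond]
          simp [List.length_take, List.length_drop]
          omega
        · rw [if_neg hcond] at hc ⊢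
          exact ih (i+1) (by omega) hc
      · rw [dif_neg hlt] at hc
        exact absurd hc (by simp)
  exact key (x.length - i) i le_rfl h

def trouble (x : List Int) (t : Int) : List Int :=
  if h : check_existence x t = true then trouble (del_loop x t 1) t
  else x
termination_by x.length
decreasing_by
  have := del_loop_length x t 1 h
  omega

-- ===== PORT B =====
-- body of B's loop: skip v when the last kept element sums with it to t, else append
def stepB (t : Int) (out : List Int) (v : Int) : List Int :=
  match out.getLast? with
  | some u => if u + v = t then out else out ++ [v]
  | none => out ++ [v]

def trouble_alt (x : List Int) (t : Int) : List Int :=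
  x.foldl (stepB t) []

-- ===== PRECONDITION & SPEC =====
def Spec_trouble (x : List Int) (t : Int) (out : List Int) : Prop := out = trouble_alt x t
instance (x : List Int) (t : Int) (out : List Int) : Decidable (Spec_trouble x t out) := by unfold Spec_trouble; infer_instance

-- ===== CLAIM (what is proved, stated in full; the proofs are below) =====
def Claim_equal_trouble : Prop := ∀ (x : List Int) (t : Int), Dom_trouble x t → Spec_trouble x t (trouble x t)

-- ===== LEMMAS AND PROOFS =====

-- canonical recursive description both ports are reduced to
def specT (x : List Int) (t : Int) : List Int :=
  match x with
  | [] => []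
  | [a] => [a]
  | a :: b :: rest => if a + b = t then specT (a :: rest) t else a :: specT (b :: rest) t
termination_by x.length
decreasing_by all_goals simp

lemma specT_nil (t : Int) : specT [] t = [] := by rw [specT]

lemma specT_one (a t : Int) : specT [a] t = [a] := by rw [specT]

lemma specT_cons2 (a b t : Int) (rest : List Int) :
    specT (a :: b :: rest) t =
      if a + b = t then specT (a :: rest) t else a :: specT (b :: rest) t := by
  rw [specT]

lemma check_shift (l : List Int) (a t : Int) (j : Nat) :
    check_loop (a :: l) t (j+2) = check_loop l t (j+1) := by
  have key : ∀ k j, l.length - j ≤ k →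
      check_loop (a :: l) t (j+2) = check_loop l t (j+1) := by
    intro k
    induction k with
    | zero =>
      intro j hk
      unfold check_loop
      rw [dif_neg (by simp only [List.length_cons]; omega), dif_neg (by omega)]
    | succ k ih =>
      intro j hk
      unfold check_loop
      by_cases hlt : j + 1 < l.length
      · rw [dif_pos (by simp only [List.length_cons]; omega), dif_pos hlt]
        simp only [show j+2-1 = j+1 from rfl, show j+1-1 = j from rfl,
          List.getD_cons_succ]
        by_cases hcond : l.getD j 0 + l.getD (j+1) 0 = t
        · rw [if_pos hcond, if_pos hcond]
        · rw [if_neg hcond, if_neg hcond]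
          exact ih (j+1) (by omega)
      · rw [dif_neg (by simp only [List.length_cons]; omega), dif_neg hlt]
  exact key (l.length - j) j le_rfl

lemma del_shift (l : List Int) (a t : Int) (j : Nat) :
    del_loop (a :: l) t (j+2) = a :: del_loop l t (j+1) := by
  have key : ∀ k j, l.length - j ≤ k →
      del_loop (a :: l) t (j+2) = a :: del_loop l t (j+1) := by
    intro k
    induction k with
    | zero =>
      intro j hk
      unfold del_loop
      rw [dif_neg (by simp only [List.length_cons]; omega), dif_neg (by omega)]
    | succ k ih =>
      intro j hk
      unfold del_loop
      by_cases hlt : j + 1 < l.length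
      · rw [dif_pos (by simp only [List.length_cons]; omega), dif_pos hlt]
        simp only [show j+2-1 = j+1 from rfl, show j+1-1 = j from rfl,
          List.getD_cons_succ]
        by_cases hcond : l.getD j 0 + l.getD (j+1) 0 = t
        · rw [if_pos hcond, if_pos hcond]
          simp [List.take_succ_cons, List.drop_succ_cons]
        · rw [if_neg hcond, if_neg hcond]
          exact ih (j+1) (by omega)
      · rw [dif_neg (by simp only [List.length_cons]; omega), dif_neg hlt]
  exact key (l.length - j) j le_rfl

lemma check_small (x : List Int) (t : Int) (h : x.length ≤ 1) :
    check_existence x t = false := by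
  unfold check_existence check_loop
  rw [dif_neg (by omega)]

lemma check_cons2 (a b t : Int) (l : List Int) :
    check_existence (a :: b :: l) t =
      (if a + b = t then true else check_existence (b :: l) t) := by
  unfold check_existence
  conv_lhs => unfold check_loop
  rw [dif_pos (by simp)]
  rw [show (1:Nat) - 1 = 0 from rfl]
  simp only [List.getD_cons_zero, List.getD_cons_succ]
  by_cases hcond : a + b = t
  · rw [if_pos hcond, if_pos hcond]
  · rw [if_neg hcond, if_neg hcond]
    exact check_shift (b :: l) a t 0

lemma del2_eq (a b t : Int) (l : List Int) (h : a + b = t) :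
    del_loop (a :: b :: l) t 1 = a :: l := by
  conv_lhs => unfold del_loop
  rw [dif_pos (by simp)]
  rw [show (1:Nat) - 1 = 0 from rfl]
  simp only [List.getD_cons_zero, List.getD_cons_succ]
  rw [if_pos h]
  simp

lemma del2_ne (a b t : Int) (l : List Int) (h : ¬ a + b = t) :
    del_loop (a :: b :: l) t 1 = a :: del_loop (b :: l) t 1 := by
  conv_lhs => unfold del_loop
  rw [dif_pos (by simp)]
  rw [show (1:Nat) - 1 = 0 from rfl]
  simp only [List.getD_cons_zero, List.getD_cons_succ]
  rw [if_neg h]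
  exact del_shift (b :: l) a t 0

lemma del_head (b t : Int) (rest : List Int) :
    ∃ d, del_loop (b :: rest) t 1 = b :: d := by
  cases rest with
  | nil =>
    refine ⟨[], ?_⟩
    unfold del_loop
    rw [dif_neg (by simp)]
  | cons c r =>
    by_cases h : b + c = t
    · exact ⟨r, del2_eq b c t r h⟩
    · exact ⟨del_loop (c :: r) t 1, del2_ne b c t r h⟩

lemma spec_no_pair (x : List Int) (t : Int)
    (h : check_existence x t = false) : specT x t = x := by
  induction x using specT.induct t with
  | case1 => rw [specT_nil]
  | case2 a => rw [specT_one]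
  | case3 a b rest hab ih =>
    rw [check_cons2, if_pos hab] at h
    exact absurd h (by simp)
  | case4 a b rest hab ih =>
    rw [check_cons2, if_neg hab] at h
    rw [specT_cons2, if_neg hab, ih h]

lemma spec_del (x : List Int) (t : Int) (h : check_existence x t = true) :
    specT (del_loop x t 1) t = specT x t := by
  induction x using specT.induct t with
  | case1 => exact absurd h (by simp [check_small])
  | case2 a => exact absurd h (by simp [check_small])
  | case3 a b rest hab ih =>
    rw [del2_eq a b t rest hab, specT_cons2, if_pos hab]
  | case4 a b rest hab ih =>
    rw [check_cons2, if_neg hab] at h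
    rw [del2_ne a b t rest hab]
    obtain ⟨d, hd⟩ := del_head b t rest
    rw [hd, specT_cons2, if_neg hab, specT_cons2, if_neg hab, ← hd, ih h]

lemma A_eq_spec (x : List Int) (t : Int) : trouble x t = specT x t := by
  induction x using trouble.induct t with
  | case1 x h ih =>
    unfold trouble
    rw [dif_pos h, ih, spec_del x t h]
  | case2 x h =>
    unfold trouble
    rw [dif_neg h]
    exact (spec_no_pair x t (by simpa using h)).symm

lemma B_acc (t : Int) (l : List Int) :
    ∀ (u : Int) (acc : List Int),
      List.foldl (stepB t) (acc ++ [u]) l = acc ++ specT (u :: l) t := by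
  induction l with
  | nil => intro u acc; simp [specT_one]
  | cons v rest ih =>
    intro u acc
    have hstep : stepB t (acc ++ [u]) v =
        if u + v = t then acc ++ [u] else (acc ++ [u]) ++ [v] := by
      unfold stepB
      rw [List.getLast?_concat]
    by_cases h : u + v = t
    · simp only [List.foldl_cons, hstep, if_pos h]
      rw [ih u acc, specT_cons2, if_pos h]
    · simp only [List.foldl_cons, hstep, if_neg h]
      rw [ih v (acc ++ [u]), specT_cons2, if_neg h]
      simp

lemma B_eq_spec (x : List Int) (t : Int) : trouble_alt x t = specT x t := by
  cases x with
  | nil => simp [trouble_alt, specT_nil]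
  | cons u rest =>
    unfold trouble_alt
    have h0 : stepB t [] u = [] ++ [u] := by rfl
    rw [List.foldl_cons, h0]
    exact B_acc t rest u []

-- ===== VERDICT (by name: the statement is the Claim_ definition above) =====
theorem trouble_spec : Claim_equal_trouble := by
  intro x t _
  unfold Spec_trouble
  rw [A_eq_spec, B_eq_spec]
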